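-- pv_equiv track=rewrite | github.com/es177/gridpulse | backend/scrapers/rss.py | _generate_why_matters
-- ===== SOURCE A (Python) =====
-- def _generate_why_matters(title: str, description: str) -> str:
--     """Generate a 'why this matters' summary based on content keywords."""
--     text = f"{title} {description}".lower()
--
--     if any(w in text for w in ["legislation", "bill", "act", "signed", "passed", "congress"]):
--         return "Policy changes directly impact the regulatory and economic landscape for nuclear energy deployment."
--     if any(w in text for w in ["funding", "grant", "loan", "investment", "raised", "billion", "million"]):
--         return "Capital flows signal market confidence and accelerate technology development timelines."
--     if any(w in text for w in ["nrc", "license", "certification", "approved", "regulatory"]):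
--         return "Regulatory milestones are critical gatekeepers for new nuclear technology deployment."
--     if any(w in text for w in ["construction", "built", "broke ground", "site", "deploy"]):
--         return "Physical construction progress moves technology from concept to grid-connected reality."
--     if any(w in text for w in ["fusion", "tokamak", "plasma", "stellarator"]):
--         return "Fusion breakthroughs could unlock virtually unlimited clean energy if commercialized."
--     if any(w in text for w in ["enrichment", "uranium", "haleu", "fuel"]):
--         return "Fuel supply chain security is essential for both existing fleet operations and advanced reactor deployment."
--     if any(w in text for w in ["grid", "demand", "capacity", "shortage", "blackout"]):
--         return "Grid reliability directly affects energy security, economic stability, and clean energy transition timing."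
--     if any(w in text for w in ["safety", "incident", "shutdown", "leak"]):
--         return "Safety events shape public perception and regulatory response, affecting the entire industry."
--
--     return "This development reflects the evolving landscape of nuclear energy policy, technology, or markets."
-- ===== SOURCE B (Python) =====
-- # B: instead of an if-chain of per-group `in` scans, run one position-driven
-- # multi-pattern scan: a first-character index maps each character of the text to
-- # the few keywords that can start there; the scan accumulates the minimum-priority
-- # matching category and one table lookup picks the message (index 8 = default).
--
-- _MESSAGES = [
--     "Policy changes directly impact the regulatory and economic landscape for nuclear energy deployment.",
--     "Capital flows signal market confidence and accelerate technology development timelines.",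
--     "Regulatory milestones are critical gatekeepers for new nuclear technology deployment.",
--     "Physical construction progress moves technology from concept to grid-connected reality.",
--     "Fusion breakthroughs could unlock virtually unlimited clean energy if commercialized.",
--     "Fuel supply chain security is essential for both existing fleet operations and advanced reactor deployment.",
--     "Grid reliability directly affects energy security, economic stability, and clean energy transition timing.",
--     "Safety events shape public perception and regulatory response, affecting the entire industry.",
--     "This development reflects the evolving landscape of nuclear energy policy, technology, or markets.",
-- ]
--
-- # first character -> the (keyword, category) pairs starting with it, categories in A's priority order
-- _INDEX = {
--     'l': [('legislation', 0), ('loan', 1), ('license', 2), ('leak', 7)],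
--     'b': [('bill', 0), ('billion', 1), ('built', 3), ('broke ground', 3), ('blackout', 6)],
--     'a': [('act', 0), ('approved', 2)],
--     's': [('signed', 0), ('site', 3), ('stellarator', 4), ('shortage', 6), ('safety', 7), ('shutdown', 7)],
--     'p': [('passed', 0), ('plasma', 4)],
--     'c': [('congress', 0), ('certification', 2), ('construction', 3), ('capacity', 6)],
--     'f': [('funding', 1), ('fusion', 4), ('fuel', 5)],
--     'g': [('grant', 1), ('grid', 6)],
--     'i': [('investment', 1), ('incident', 7)],
--     'r': [('raised', 1), ('regulatory', 2)],
--     'm': [('million', 1)],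
--     'n': [('nrc', 2)],
--     'd': [('deploy', 3), ('demand', 6)],
--     't': [('tokamak', 4)],
--     'e': [('enrichment', 5)],
--     'u': [('uranium', 5)],
--     'h': [('haleu', 5)],
-- }
--
--
-- def _generate_why_matters(title: str, description: str) -> str:
--     """Generate a 'why this matters' summary based on content keywords."""
--     text = f"{title} {description}".lower()
--     best = 8  # index of the default message = "no category matched yet"
--     for j, ch in enumerate(text):
--         for kw, cat in _INDEX.get(ch, []):
--             if text.startswith(kw, j):
--                 best = min(best, cat)
--     return _MESSAGES[best]
-- ===== Notes on version B (the rewrite author's own statement) =====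
-- stated objective: alternative
-- what changed: Replaced the eight-branch if-chain of per-group substring scans by a single position-driven multi-pattern scan: a first-character index maps each text position to the few keywords that can start there, the scan accumulates the minimum matching category index, and one table lookup picks the message.
import Mathlib
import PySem

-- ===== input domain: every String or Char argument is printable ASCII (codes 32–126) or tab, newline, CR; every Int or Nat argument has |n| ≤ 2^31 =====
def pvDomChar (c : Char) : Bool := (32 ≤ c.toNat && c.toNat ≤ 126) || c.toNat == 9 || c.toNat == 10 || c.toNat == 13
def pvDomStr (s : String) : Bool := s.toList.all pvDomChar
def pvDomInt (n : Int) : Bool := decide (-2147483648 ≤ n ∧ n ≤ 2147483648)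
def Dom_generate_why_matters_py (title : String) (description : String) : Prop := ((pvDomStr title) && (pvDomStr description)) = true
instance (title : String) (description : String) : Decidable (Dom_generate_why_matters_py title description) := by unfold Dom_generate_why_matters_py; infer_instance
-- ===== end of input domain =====

-- B replaces A's eight-branch if-chain of per-group substring scans by one position-driven
-- multi-pattern scan accumulating the minimum matching category index, then a table lookup
-- (objective: alternative algorithm, same cost).


-- ===== PORT A =====
-- pvGrp i names the literal keyword list of A's i-th guard, in A's order.
def pvGrp : Nat → List String
  | 0 => ["legislation", "bill", "act", "signed", "passed", "congress"]
  | 1 => ["funding", "grant", "loan", "investment", "raised", "billion", "million"]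
  | 2 => ["nrc", "license", "certification", "approved", "regulatory"]
  | 3 => ["construction", "built", "broke ground", "site", "deploy"]
  | 4 => ["fusion", "tokamak", "plasma", "stellarator"]
  | 5 => ["enrichment", "uranium", "haleu", "fuel"]
  | 6 => ["grid", "demand", "capacity", "shortage", "blackout"]
  | 7 => ["safety", "incident", "shutdown", "leak"]
  | _ => []

def generate_why_matters_py (title : String) (description : String) : String :=
  let text := PySem.Str.lower (PySem.Str.join " " [title, description])
  if (pvGrp 0).any (fun w => PySem.Str.isIn w text) then
    "Policy changes directly impact the regulatory and economic landscape for nuclear energy deployment."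
  else if (pvGrp 1).any (fun w => PySem.Str.isIn w text) then
    "Capital flows signal market confidence and accelerate technology development timelines."
  else if (pvGrp 2).any (fun w => PySem.Str.isIn w text) then
    "Regulatory milestones are critical gatekeepers for new nuclear technology deployment."
  else if (pvGrp 3).any (fun w => PySem.Str.isIn w text) then
    "Physical construction progress moves technology from concept to grid-connected reality."
  else if (pvGrp 4).any (fun w => PySem.Str.isIn w text) then
    "Fusion breakthroughs could unlock virtually unlimited clean energy if commercialized."
  else if (pvGrp 5).any (fun w => PySem.Str.isIn w text) then
    "Fuel supply chain security is essential for both existing fleet operations and advanced reactor deployment."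
  else if (pvGrp 6).any (fun w => PySem.Str.isIn w text) then
    "Grid reliability directly affects energy security, economic stability, and clean energy transition timing."
  else if (pvGrp 7).any (fun w => PySem.Str.isIn w text) then
    "Safety events shape public perception and regulatory response, affecting the entire industry."
  else
    "This development reflects the evolving landscape of nuclear energy policy, technology, or markets."

-- ===== PORT B =====
def pvMsgs : List String :=
  [ "Policy changes directly impact the regulatory and economic landscape for nuclear energy deployment.",
    "Capital flows signal market confidence and accelerate technology development timelines.",
    "Regulatory milestones are critical gatekeepers for new nuclear technology deployment.",
    "Physical construction progress moves technology from concept to grid-connected reality.",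
    "Fusion breakthroughs could unlock virtually unlimited clean energy if commercialized.",
    "Fuel supply chain security is essential for both existing fleet operations and advanced reactor deployment.",
    "Grid reliability directly affects energy security, economic stability, and clean energy transition timing.",
    "Safety events shape public perception and regulatory response, affecting the entire industry.",
    "This development reflects the evolving landscape of nuclear energy policy, technology, or markets." ]

-- first character -> the (keyword, category) pairs starting with it (Source B's _INDEX literal)
def pvIdx : PySem.Dict Char (List (String × Nat)) := PySem.Dict.mk
  [ ('l', [("legislation", 0), ("loan", 1), ("license", 2), ("leak", 7)]),
    ('b', [("bill", 0), ("billion", 1), ("built", 3), ("broke ground", 3), ("blackout", 6)]),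
    ('a', [("act", 0), ("approved", 2)]),
    ('s', [("signed", 0), ("site", 3), ("stellarator", 4), ("shortage", 6), ("safety", 7), ("shutdown", 7)]),
    ('p', [("passed", 0), ("plasma", 4)]),
    ('c', [("congress", 0), ("certification", 2), ("construction", 3), ("capacity", 6)]),
    ('f', [("funding", 1), ("fusion", 4), ("fuel", 5)]),
    ('g', [("grant", 1), ("grid", 6)]),
    ('i', [("investment", 1), ("incident", 7)]),
    ('r', [("raised", 1), ("regulatory", 2)]),
    ('m', [("million", 1)]),
    ('n', [("nrc", 2)]),
    ('d', [("deploy", 3), ("demand", 6)]),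
    ('t', [("tokamak", 4)]),
    ('e', [("enrichment", 5)]),
    ('u', [("uranium", 5)]),
    ('h', [("haleu", 5)]) ]

-- the scan loop of Source B: for j, ch in enumerate(text): for kw, cat in _INDEX.get(ch, []):
--   if text.startswith(kw, j): best = min(best, cat)
-- enumerate indices are ≥ 0, so `.toNat` is exact; text.startswith(kw, j) with 0 ≤ j is
-- exactly PySem.Chars.startswith on `toList.drop j`.
def pvBest (text : String) : Nat :=
  (PySem.List.enumerate text.toList).foldl
    (fun best jc =>
      (PySem.Dict.getD pvIdx jc.2 []).foldl
        (fun best kc =>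
          if PySem.Chars.startswith (text.toList.drop jc.1.toNat) kc.1.toList then min best kc.2
          else best)
        best)
    8

def generate_why_matters_py_alt (title : String) (description : String) : String :=
  let text := PySem.Str.lower (PySem.Str.join " " [title, description])
  -- _MESSAGES[best]: 0 ≤ best ≤ 8 < 9 always, so the Python index is in range and getD's default is never used
  pvMsgs.getD (pvBest text) ""

-- ===== PRECONDITION & SPEC =====
def Spec_generate_why_matters_py (title : String) (description : String) (out : String) : Prop := out = generate_why_matters_py_alt title description
instance (title : String) (description : String) (out : String) : Decidable (Spec_generate_why_matters_py title description out) := by unfold Spec_generate_why_matters_py; infer_instance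

-- ===== CLAIM (what is proved, stated in full; the proofs are below) =====
def Claim_equal_generate_why_matters_py : Prop := ∀ (title : String) (description : String), Dom_generate_why_matters_py title description → Spec_generate_why_matters_py title description (generate_why_matters_py title description)

-- ===== LEMMAS AND PROOFS =====

-- the flat keyword table (proof-side view of the index buckets, in A's guard order)
def pvKws : List (String × Nat) :=
  [ ("legislation", 0), ("bill", 0), ("act", 0), ("signed", 0), ("passed", 0), ("congress", 0),
    ("funding", 1), ("grant", 1), ("loan", 1), ("investment", 1), ("raised", 1), ("billion", 1), ("million", 1),
    ("nrc", 2), ("license", 2), ("certification", 2), ("approved", 2), ("regulatory", 2),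
    ("construction", 3), ("built", 3), ("broke ground", 3), ("site", 3), ("deploy", 3),
    ("fusion", 4), ("tokamak", 4), ("plasma", 4), ("stellarator", 4),
    ("enrichment", 5), ("uranium", 5), ("haleu", 5), ("fuel", 5),
    ("grid", 6), ("demand", 6), ("capacity", 6), ("shortage", 6), ("blackout", 6),
    ("safety", 7), ("incident", 7), ("shutdown", 7), ("leak", 7) ]


-- generic facts about a "min over the elements that satisfy p" fold
theorem pvFoldMin_le_init {α : Type} (p : α → Bool) (f : α → Nat) (L : List α) (init : Nat) :
    L.foldl (fun b x => if p x then min b (f x) else b) init ≤ init := by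
  induction L generalizing init with
  | nil => simp
  | cons a L ih =>
    simp only [List.foldl_cons]
    refine le_trans (ih _) ?_
    split <;> omega

theorem pvFoldMin_le {α : Type} (p : α → Bool) (f : α → Nat) (L : List α) (init : Nat)
    (x : α) : x ∈ L → p x = true →
    L.foldl (fun b x => if p x then min b (f x) else b) init ≤ f x := by
  induction L generalizing init with
  | nil => intro hx; cases hx
  | cons a L ih =>
    intro hx hp
    simp only [List.foldl_cons]
    rcases List.mem_cons.mp hx with rfl | hx'
    · refine le_trans (pvFoldMin_le_init _ _ _ _) ?_
      rw [if_pos hp]; omega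
    · exact ih _ hx' hp

theorem pvFoldMin_cases {α : Type} (p : α → Bool) (f : α → Nat) (L : List α) (init : Nat) :
    L.foldl (fun b x => if p x then min b (f x) else b) init = init ∨
      ∃ x ∈ L, p x = true ∧ L.foldl (fun b x => if p x then min b (f x) else b) init = f x := by
  induction L generalizing init with
  | nil => left; rfl
  | cons a L ih =>
    simp only [List.foldl_cons]
    by_cases hpa : p a = true
    · rw [if_pos hpa]
      rcases ih (min init (f a)) with h | ⟨x, hx, hp, he⟩
      · rcases Nat.le_total init (f a) with hle | hle
        · left; rw [h]; omega
        · right; exact ⟨a, List.mem_cons_self .., hpa, by rw [h]; omega⟩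
      · right; exact ⟨x, List.mem_cons_of_mem _ hx, hp, he⟩
    · rw [if_neg hpa]
      rcases ih init with h | ⟨x, hx, hp, he⟩
      · left; exact h
      · right; exact ⟨x, List.mem_cons_of_mem _ hx, hp, he⟩

theorem pvFoldl_flatMap {α β σ : Type} (L : List α) (f : α → List β) (g : σ → β → σ) (s : σ) :
    L.foldl (fun s a => (f a).foldl g s) s = (L.flatMap f).foldl g s := by
  induction L generalizing s with
  | nil => rfl
  | cons a L ih => simp [List.flatMap_cons, List.foldl_append, ih]

-- the flattened (position, (keyword, category)) pair list of B's two nested loops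
def pvPairs (cs : List Char) : List (Int × (String × Nat)) :=
  (PySem.List.enumerate cs).flatMap
    (fun jc => (PySem.Dict.getD pvIdx jc.2 []).map (fun kc => (jc.1, kc)))

def pvP (cs : List Char) (x : Int × (String × Nat)) : Bool :=
  PySem.Chars.startswith (cs.drop x.1.toNat) x.2.1.toList

theorem pvBest_eq_flat (text : String) :
    pvBest text =
      (pvPairs text.toList).foldl
        (fun b x => if pvP text.toList x then min b x.2.2 else b) 8 := by
  unfold pvBest pvPairs pvP
  rw [← pvFoldl_flatMap]
  simp [List.foldl_map]

-- every keyword is nonempty and is listed in the bucket of its own first character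
theorem pvKws_props : ∀ kc ∈ pvKws,
    kc.1.toList ≠ [] ∧ kc ∈ PySem.Dict.getD pvIdx (kc.1.toList.headD ' ') [] := by
  set_option maxHeartbeats 2000000 in decide

-- every bucket entry comes from the keyword table
theorem pv_bucket_sub (c : Char) (kc : String × Nat)
    (h : kc ∈ PySem.Dict.getD pvIdx c []) : kc ∈ pvKws := by
  unfold PySem.Dict.getD at h
  cases hf : pvIdx.get? c with
  | none => rw [hf] at h; cases h
  | some v =>
    rw [hf] at h
    simp only [Option.getD_some] at h
    unfold PySem.Dict.get? at hf
    obtain ⟨e, he, hv⟩ : ∃ e ∈ pvIdx.items, e.2 = v := by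
      cases hfind : List.find? (fun p => p.1 == c) pvIdx.items with
      | none => rw [hfind] at hf; simp at hf
      | some e =>
        rw [hfind] at hf
        exact ⟨e, List.mem_of_find?_eq_some hfind, by simpa using hf⟩
    subst hv
    fin_cases he <;> fin_cases h <;> decide

theorem pv_mem_pvKws {i : Nat} (hi : i < 8) {kw : String} (h : kw ∈ pvGrp i) :
    (kw, i) ∈ pvKws := by
  interval_cases i <;> simp [pvGrp] at h <;> simp [pvKws] <;> tauto

theorem pv_of_mem_pvKws {kw : String} {cat : Nat} (h : (kw, cat) ∈ pvKws) :
    cat < 8 ∧ kw ∈ pvGrp cat := by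
  fin_cases h <;> simp [pvGrp]

-- group i matches the text iff some scanned pair of category i matches at some position
theorem pv_match_iff (text : String) {i : Nat} (hi : i < 8) :
    (pvGrp i).any (fun w => PySem.Str.isIn w text) = true ↔
      ∃ x ∈ pvPairs text.toList, pvP text.toList x = true ∧ x.2.2 = i := by
  constructor
  · intro h
    obtain ⟨w, hw, hin⟩ := List.any_eq_true.mp h
    have hin' : PySem.Chars.isIn w.toList text.toList = true := by
      simpa using hin
    obtain ⟨j, hj⟩ := (PySem.Chars.exists_prefix_drop_iff_isIn _ _).mpr hin'
    have hkmem : (w, i) ∈ pvKws := pv_mem_pvKws hi hw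
    obtain ⟨hne, hbucket⟩ := pvKws_props _ hkmem
    obtain ⟨k0, ks, hK⟩ := List.exists_cons_of_ne_nil hne
    obtain ⟨t, ht⟩ := hj
    have hget? : text.toList[j]? = some k0 := by
      rw [← List.head?_drop, ← ht, hK]; rfl
    obtain ⟨hjlt, hget⟩ := List.getElem?_eq_some_iff.mp hget?
    refine ⟨((0 : Int) + (j : Nat), (w, i)), ?_, ?_, rfl⟩
    · unfold pvPairs
      simp only [List.mem_flatMap, List.mem_map]
      refine ⟨((0 : Int) + (j : Nat), text.toList[j]), ?_, (w, i), ?_, rfl⟩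
      · exact (PySem.List.mem_enumerate_iff _ _ _).mpr ⟨j, hjlt, rfl⟩
      · rw [hget]
        simpa [hK] using hbucket
    · unfold pvP
      have hnat : ((0 : Int) + (j : Nat)).toNat = j := by omega
      rw [hnat]
      exact (PySem.Chars.startswith_iff _ _).mpr ⟨t, ht⟩
  · rintro ⟨x, hmem, hp, hf⟩
    subst hf
    unfold pvPairs at hmem
    simp only [List.mem_flatMap, List.mem_map] at hmem
    obtain ⟨jc, hjc, kc, hkc, he⟩ := hmem
    subst he
    obtain ⟨kw, cat⟩ := kc
    have hkmem : (kw, cat) ∈ pvKws := pv_bucket_sub _ _ hkc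
    unfold pvP at hp
    have hpre : kw.toList <+: text.toList.drop jc.1.toNat :=
      (PySem.Chars.startswith_iff _ _).mp hp
    have hin : PySem.Chars.isIn kw.toList text.toList = true :=
      (PySem.Chars.exists_prefix_drop_iff_isIn _ _).mp ⟨jc.1.toNat, hpre⟩
    exact List.any_eq_true.mpr ⟨kw, (pv_of_mem_pvKws hkmem).2, by simpa using hin⟩

theorem pvBest_le (text : String) (x : Int × (String × Nat))
    (hx : x ∈ pvPairs text.toList) (hp : pvP text.toList x = true) :
    pvBest text ≤ x.2.2 := by
  rw [pvBest_eq_flat]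
  exact pvFoldMin_le _ _ _ _ _ hx hp

theorem pvBest_cases (text : String) :
    pvBest text = 8 ∨
      ∃ x ∈ pvPairs text.toList, pvP text.toList x = true ∧ pvBest text = x.2.2 := by
  rw [pvBest_eq_flat]
  exact pvFoldMin_cases _ _ _ _

theorem pvPairs_cat_lt {x : Int × (String × Nat)} {cs : List Char} (hx : x ∈ pvPairs cs) :
    x.2.2 < 8 := by
  unfold pvPairs at hx
  simp only [List.mem_flatMap, List.mem_map] at hx
  obtain ⟨jc, hjc, kc, hkc, he⟩ := hx
  subst he
  obtain ⟨kw, cat⟩ := kc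
  exact (pv_of_mem_pvKws (pv_bucket_sub _ _ hkc)).1

-- pvBest text is i when group i matches and no earlier group does
theorem pvBest_pin (text : String) {i : Nat} (hi : i < 8)
    (hQ : (pvGrp i).any (fun w => PySem.Str.isIn w text) = true)
    (hlt : ∀ k, k < i → (pvGrp k).any (fun w => PySem.Str.isIn w text) = false) :
    pvBest text = i := by
  obtain ⟨x, hx, hp, hf⟩ := (pv_match_iff text hi).mp hQ
  have hle : pvBest text ≤ i := hf ▸ pvBest_le text x hx hp
  rcases pvBest_cases text with h8 | ⟨y, hy, hpy, hey⟩
  · omega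
  · have hcat : y.2.2 < 8 := pvPairs_cat_lt hy
    have hym : (pvGrp (pvBest text)).any (fun w => PySem.Str.isIn w text) = true :=
      (pv_match_iff text (hey ▸ hcat)).mpr ⟨y, hy, hpy, hey.symm⟩
    by_contra hne
    have hltI : pvBest text < i := lt_of_le_of_ne hle hne
    rw [hlt _ hltI] at hym
    cases hym

theorem pvBest_none (text : String)
    (hlt : ∀ k, k < 8 → (pvGrp k).any (fun w => PySem.Str.isIn w text) = false) :
    pvBest text = 8 := by
  rcases pvBest_cases text with h8 | ⟨y, hy, hpy, hey⟩
  · exact h8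
  · have hcat : y.2.2 < 8 := pvPairs_cat_lt hy
    have hym : (pvGrp (pvBest text)).any (fun w => PySem.Str.isIn w text) = true :=
      (pv_match_iff text (hey ▸ hcat)).mpr ⟨y, hy, hpy, hey.symm⟩
    rw [hlt _ (hey ▸ hcat)] at hym
    cases hym

theorem pv_main (text : String) :
    (if (pvGrp 0).any (fun w => PySem.Str.isIn w text) then
      "Policy changes directly impact the regulatory and economic landscape for nuclear energy deployment."
    else if (pvGrp 1).any (fun w => PySem.Str.isIn w text) then
      "Capital flows signal market confidence and accelerate technology development timelines."
    else if (pvGrp 2).any (fun w => PySem.Str.isIn w text) then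
      "Regulatory milestones are critical gatekeepers for new nuclear technology deployment."
    else if (pvGrp 3).any (fun w => PySem.Str.isIn w text) then
      "Physical construction progress moves technology from concept to grid-connected reality."
    else if (pvGrp 4).any (fun w => PySem.Str.isIn w text) then
      "Fusion breakthroughs could unlock virtually unlimited clean energy if commercialized."
    else if (pvGrp 5).any (fun w => PySem.Str.isIn w text) then
      "Fuel supply chain security is essential for both existing fleet operations and advanced reactor deployment."
    else if (pvGrp 6).any (fun w => PySem.Str.isIn w text) then
      "Grid reliability directly affects energy security, economic stability, and clean energy transition timing."
    else if (pvGrp 7).any (fun w => PySem.Str.isIn w text) then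
      "Safety events shape public perception and regulatory response, affecting the entire industry."
    else
      "This development reflects the evolving landscape of nuclear energy policy, technology, or markets.")
    = pvMsgs.getD (pvBest text) "" := by
  by_cases h0 : (pvGrp 0).any (fun w => PySem.Str.isIn w text) = true
  · rw [if_pos h0, pvBest_pin text (by omega) h0 (fun k hk => by omega)]
    rfl
  · by_cases h1 : (pvGrp 1).any (fun w => PySem.Str.isIn w text) = true
    · rw [if_neg h0, if_pos h1,
        pvBest_pin text (by omega) h1 (fun k hk => by (interval_cases k; simpa using h0))]
      rfl
    · by_cases h2 : (pvGrp 2).any (fun w => PySem.Str.isIn w text) = true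
      · rw [if_neg h0, if_neg h1, if_pos h2,
          pvBest_pin text (by omega) h2 (fun k hk => by
            interval_cases k <;> first | simpa using h0 | simpa using h1)]
        rfl
      · by_cases h3 : (pvGrp 3).any (fun w => PySem.Str.isIn w text) = true
        · rw [if_neg h0, if_neg h1, if_neg h2, if_pos h3,
            pvBest_pin text (by omega) h3 (fun k hk => by
              interval_cases k <;> first | simpa using h0 | simpa using h1 | simpa using h2)]
          rfl
        · by_cases h4 : (pvGrp 4).any (fun w => PySem.Str.isIn w text) = true
          · rw [if_neg h0, if_neg h1, if_neg h2, if_neg h3, if_pos h4,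
              pvBest_pin text (by omega) h4 (fun k hk => by
                interval_cases k <;> first | simpa using h0 | simpa using h1 | simpa using h2 | simpa using h3)]
            rfl
          · by_cases h5 : (pvGrp 5).any (fun w => PySem.Str.isIn w text) = true
            · rw [if_neg h0, if_neg h1, if_neg h2, if_neg h3, if_neg h4, if_pos h5,
                pvBest_pin text (by omega) h5 (fun k hk => by
                  interval_cases k <;> first | simpa using h0 | simpa using h1 | simpa using h2 | simpa using h3 | simpa using h4)]
              rfl
            · by_cases h6 : (pvGrp 6).any (fun w => PySem.Str.isIn w text) = true
              · rw [if_neg h0, if_neg h1, if_neg h2, if_neg h3, if_neg h4, if_neg h5, if_pos h6,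
                  pvBest_pin text (by omega) h6 (fun k hk => by
                    interval_cases k <;> first | simpa using h0 | simpa using h1 | simpa using h2 | simpa using h3 | simpa using h4 | simpa using h5)]
                rfl
              · by_cases h7 : (pvGrp 7).any (fun w => PySem.Str.isIn w text) = true
                · rw [if_neg h0, if_neg h1, if_neg h2, if_neg h3, if_neg h4, if_neg h5, if_neg h6,
                    if_pos h7,
                    pvBest_pin text (by omega) h7 (fun k hk => by
                      interval_cases k <;> first | simpa using h0 | simpa using h1 | simpa using h2 | simpa using h3 | simpa using h4 | simpa using h5 | simpa using h6)]
                  rfl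
                · rw [if_neg h0, if_neg h1, if_neg h2, if_neg h3, if_neg h4, if_neg h5, if_neg h6,
                    if_neg h7,
                    pvBest_none text (fun k hk => by
                      interval_cases k <;> first | simpa using h0 | simpa using h1 | simpa using h2 | simpa using h3 | simpa using h4 | simpa using h5 | simpa using h6 | simpa using h7)]
                  rfl

-- ===== VERDICT (by name: the statement is the Claim_ definition above) =====
theorem generate_why_matters_py_spec : Claim_equal_generate_why_matters_py := by
  intro title description _
  unfold Spec_generate_why_matters_py generate_why_matters_py generate_why_matters_py_alt
  exact pv_main (PySem.Str.lower (PySem.Str.join " " [title, description]))
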